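-- pv_equiv track=rewrite | github.com/malaonda222/Python | ESERCIZI_ESTATE/BubbleSort/3.py | converti_dizionario
-- ===== SOURCE A (Python) =====
-- def converti_dizionario(dizionario: dict[str, int]) -> list[tuple]:
--     lista_tuple = list(dizionario.items())
--     n = len(lista_tuple)
--     for i in range(n):
--         for j in range(n-i-1):
--             if len(lista_tuple[j][0])>len(lista_tuple[j+1][0]):
--                 lista_tuple[j], lista_tuple[j+1] = lista_tuple[j+1], lista_tuple[j]
--     return lista_tuple
-- ===== SOURCE B (Python) =====
-- def converti_dizionario(dizionario: dict[str, int]) -> list[tuple]: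
--     secchi = {}
--     for chiave, valore in dizionario.items():
--         secchi.setdefault(len(chiave), []).append((chiave, valore))
--     risultato = []
--     for lunghezza in sorted(secchi):
--         risultato.extend(secchi[lunghezza])
--     return risultato
-- ===== Notes on version B (the rewrite author's own statement) =====
-- stated objective: faster
-- what changed: Replaced the quadratic bubble sort of the items by key length with a single-pass bucket grouping (length -> list of items) followed by concatenating the buckets in ascending length order, which preserves the stable order.
import Mathlib
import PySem

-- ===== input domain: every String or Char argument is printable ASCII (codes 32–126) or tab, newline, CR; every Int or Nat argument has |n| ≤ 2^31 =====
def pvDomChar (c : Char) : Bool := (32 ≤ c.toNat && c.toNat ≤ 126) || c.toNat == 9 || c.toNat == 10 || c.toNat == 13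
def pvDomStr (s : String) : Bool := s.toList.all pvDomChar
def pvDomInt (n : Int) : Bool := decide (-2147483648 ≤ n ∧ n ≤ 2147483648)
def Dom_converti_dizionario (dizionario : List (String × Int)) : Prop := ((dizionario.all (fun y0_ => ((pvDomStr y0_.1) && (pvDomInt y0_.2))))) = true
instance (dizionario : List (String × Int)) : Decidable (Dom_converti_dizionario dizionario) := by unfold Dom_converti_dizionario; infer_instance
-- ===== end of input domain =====

-- B replaces A's quadratic bubble sort of the items by key length with a one-pass bucket
-- grouping by length concatenated in ascending length order (objective: faster, same stable result).

-- ===== PORT A =====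
-- bubble sort of the dict's items by key length, with index loops, literal
def converti_dizionario (dizionario : List (String × Int)) : List (String × Int) :=
  let lista_tuple := (PySem.Dict.ofList dizionario).items
  let n : Int := lista_tuple.length
  (PySem.List.pyRange 0 n).foldl (fun lst i =>
    (PySem.List.pyRange 0 (n - i - 1)).foldl (fun lst j =>
      let a := PySem.List.pyGetD lst j ("", 0)
      let b := PySem.List.pyGetD lst (j + 1) ("", 0)
      if PySem.Str.len b.1 < PySem.Str.len a.1 then
        (lst.set j.toNat b).set (j.toNat + 1) a
      else lst) lst) lista_tuple

-- ===== PORT B =====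
-- bucket the items by key length, then concatenate buckets by ascending length
def converti_dizionario_alt (dizionario : List (String × Int)) : List (String × Int) :=
  let secchi := (PySem.Dict.ofList dizionario).items.foldl
      (fun d p => d.modify (PySem.Str.len p.1) [] (fun l => l ++ [p])) PySem.Dict.empty
  (PySem.List.sorted (PySem.Dict.keys secchi) (fun l => l)).foldl
      (fun acc lunghezza => acc ++ secchi.getD lunghezza []) []

-- ===== PRECONDITION & SPEC =====
def Spec_converti_dizionario (dizionario : List (String × Int)) (out : List (String × Int)) : Prop := out = converti_dizionario_alt dizionario
instance (dizionario : List (String × Int)) (out : List (String × Int)) : Decidable (Spec_converti_dizionario dizionario out) := by unfold Spec_converti_dizionario; infer_instance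

-- ===== CLAIM (what is proved, stated in full; the proofs are below) =====
def Claim_equal_converti_dizionario : Prop := ∀ (dizionario : List (String × Int)), Dom_converti_dizionario dizionario → Spec_converti_dizionario dizionario (converti_dizionario dizionario)

-- ===== LEMMAS AND PROOFS =====

-- the sort key: length of the key string
def kL (p : String × Int) : Int := PySem.Str.len p.1

-- one bubble pass performing the first k adjacent comparisons, structurally
def bpassK : Nat → List (String × Int) → List (String × Int)
  | 0, l => l
  | _ + 1, [] => []
  | _ + 1, [a] => [a]
  | k + 1, a :: b :: t => if kL b < kL a then b :: bpassK k (a :: t) else a :: bpassK k (b :: t)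

-- the whole bubble sort: m remaining outer iterations, passes of length m-1, …, 0
def outerB : Nat → List (String × Int) → List (String × Int)
  | 0, l => l
  | m + 1, l => outerB m (bpassK m l)

-- the items whose key length is c, in order
def fK (c : Int) (l : List (String × Int)) : List (String × Int) :=
  l.filter (fun p => kL p == c)

theorem length_bpassK (k : Nat) (l : List (String × Int)) : (bpassK k l).length = l.length := by
  induction k, l using bpassK.induct with
  | case1 l => simp [bpassK]
  | case2 k => simp [bpassK]
  | case3 k a => simp [bpassK]
  | case4 k a b t h ih => simp [bpassK, if_pos h, ih]
  | case5 k a b t h ih => simp [bpassK, if_neg (h), ih]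

theorem perm_bpassK (k : Nat) (l : List (String × Int)) : (bpassK k l).Perm l := by
  induction k, l using bpassK.induct with
  | case1 l => simp [bpassK]
  | case2 k => simp [bpassK]
  | case3 k a => simp [bpassK]
  | case4 k a b t h ih => simp only [bpassK, if_pos h]; exact (ih.cons b).trans (List.Perm.swap a b t)
  | case5 k a b t h ih => simp only [bpassK, if_neg (h)]; exact ih.cons a

theorem fK_bpassK (k : Nat) (l : List (String × Int)) (c : Int) : fK c (bpassK k l) = fK c l := by
  induction k, l using bpassK.induct with
  | case1 l => simp [bpassK]
  | case2 k => simp [bpassK]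
  | case3 k a => simp [bpassK]
  | case4 k a b t h ih =>
      simp only [bpassK, if_pos h]
      simp only [fK, List.filter_cons] at *
      rw [ih]
      have hne : kL b ≠ kL a := ne_of_lt h
      by_cases hb : kL b = c <;> by_cases ha : kL a = c <;> simp_all
  | case5 k a b t h ih =>
      simp only [bpassK, if_neg (h)]
      simp only [fK, List.filter_cons] at *
      rw [ih]

theorem bpassK_max (k : Nat) (l : List (String × Int)) (h : l.length = k + 1) :
    ∃ u m, bpassK k l = u ++ [m] ∧ ∀ x ∈ l, kL x ≤ kL m := by
  induction k generalizing l with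
  | zero =>
      match l, h with
      | [x], _ => exact ⟨[], x, rfl, by simp [bpassK]⟩
  | succ k ih =>
      match l, h with
      | a :: b :: t, h =>
        simp only [List.length_cons] at h
        by_cases hab : kL b < kL a
        · obtain ⟨u, m, he, hm⟩ := ih (a :: t) (by simpa using h)
          refine ⟨b :: u, m, by simp [bpassK, if_pos hab, he], ?_⟩
          intro x hx
          simp only [List.mem_cons] at hx
          rcases hx with rfl | rfl | hx
          · exact hm x (by simp)
          · exact le_trans (le_of_lt hab) (hm a (by simp))
          · exact hm x (by simp [hx])
        · obtain ⟨u, m, he, hm⟩ := ih (b :: t) (by simpa using h)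
          refine ⟨a :: u, m, by simp [bpassK, if_neg hab, he], ?_⟩
          intro x hx
          simp only [List.mem_cons] at hx
          rcases hx with rfl | rfl | hx
          · exact le_trans (not_lt.mp hab) (hm b (by simp))
          · exact hm x (by simp)
          · exact hm x (by simp [hx])

theorem bpassK_split (k : Nat) (u v : List (String × Int)) (h : u.length = k + 1) :
    bpassK k (u ++ v) = bpassK k u ++ v := by
  induction k generalizing u with
  | zero =>
      match u, h with
      | [x], _ => simp [bpassK]
  | succ k ih =>
      match u, h with
      | a :: b :: t, h =>
        simp only [List.length_cons] at h
        by_cases hab : kL b < kL a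
        · rw [show a :: b :: t ++ v = (a :: b :: t) ++ v from rfl]
          simp only [List.cons_append, bpassK, if_pos hab]
          rw [← List.cons_append, ← List.cons_append, ih (a :: t) (by simpa using h)]
          simp
        · simp only [List.cons_append, bpassK, if_neg hab]
          rw [← List.cons_append, ih (b :: t) (by simpa using h)]

theorem fK_outerB (m : Nat) (l : List (String × Int)) (c : Int) : fK c (outerB m l) = fK c l := by
  induction m generalizing l with
  | zero => rfl
  | succ m ih => rw [outerB, ih, fK_bpassK]

theorem outerB_pairwise (m : Nat) (u v : List (String × Int)) (hu : u.length = m)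
    (hcross : ∀ x ∈ u, ∀ y ∈ v, kL x ≤ kL y) (hv : v.Pairwise (fun a b => kL a ≤ kL b)) :
    (outerB m (u ++ v)).Pairwise (fun a b => kL a ≤ kL b) := by
  induction m generalizing u v with
  | zero =>
      match u, hu with
      | [], _ => simpa using hv
  | succ m ih =>
      rw [outerB, bpassK_split m u v hu]
      obtain ⟨u', mx, he, hm⟩ := bpassK_max m u hu
      have hmem : ∀ x ∈ u', x ∈ u := by
        intro x hx
        have := (perm_bpassK m u).mem_iff (a := x)
        exact this.mp (by simp [he, hx])
      have hmxu : mx ∈ u := by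
        have := (perm_bpassK m u).mem_iff (a := mx)
        exact this.mp (by simp [he])
      have hlen : u'.length = m := by
        have := length_bpassK m u
        rw [he] at this
        simp at this
        omega
      rw [he, List.append_assoc]
      apply ih u' (mx :: v) hlen
      · intro x hx y hy
        rcases List.mem_cons.mp hy with rfl | hy
        · exact hm x (hmem x hx)
        · exact hcross x (hmem x hx) y hy
      · exact List.Pairwise.cons (fun y hy => hcross mx hmxu y hy) hv

theorem stable_unique (ys zs : List (String × Int))
    (hy : ys.Pairwise (fun a b => kL a ≤ kL b)) (hz : zs.Pairwise (fun a b => kL a ≤ kL b))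
    (hf : ∀ c : Int, fK c ys = fK c zs) : ys = zs := by
  induction ys generalizing zs with
  | nil =>
      cases zs with
      | nil => rfl
      | cons b zs' =>
          have := hf (kL b)
          simp [fK, List.filter_cons] at this
  | cons a ys' ih =>
      cases zs with
      | nil =>
          have := hf (kL a)
          simp [fK, List.filter_cons] at this
      | cons b zs' =>
          have hyt := List.pairwise_cons.mp hy
          have hzt := List.pairwise_cons.mp hz
          have hk : kL a = kL b := by
            rcases lt_trichotomy (kL a) (kL b) with hlt | heq | hgt
            · exfalso
              have := hf (kL a)
              have hbz : fK (kL a) (b :: zs') = [] := by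
                simp only [fK]
                rw [List.filter_eq_nil_iff]
                intro x hx
                rcases List.mem_cons.mp hx with rfl | hx
                · simp; omega
                · have := hzt.1 x hx; simp; omega
              rw [hbz] at this
              simp [fK, List.filter_cons] at this
            · exact heq
            · exfalso
              have := hf (kL b)
              have hay : fK (kL b) (a :: ys') = [] := by
                simp only [fK]
                rw [List.filter_eq_nil_iff]
                intro x hx
                rcases List.mem_cons.mp hx with rfl | hx
                · simp; omega
                · have := hyt.1 x hx; simp; omega
              rw [hay] at this
              simp [fK, List.filter_cons] at this
          have hab : a = b ∧ fK (kL a) ys' = fK (kL a) zs' := by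
            have := hf (kL a)
            simp only [fK, List.filter_cons] at this
            rw [if_pos (by simp), if_pos (by simp [hk])] at this
            exact ⟨(List.cons.injEq _ _ _ _ ▸ this).1, by
              simpa [fK] using (List.cons.injEq _ _ _ _ ▸ this).2⟩
          rcases hab with ⟨rfl, htail⟩
          have : ys' = zs' := by
            apply ih zs' hyt.2 hzt.2
            intro c
            by_cases hc : c = kL a
            · rw [hc]; exact htail
            · have := hf c
              simpa [fK, List.filter_cons, Ne.symm hc, hk] using this
          rw [this]

theorem inner_bridge (k : Nat) (p t : List (String × Int)) (h : k < t.length) :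
    (PySem.List.pyRange (p.length : Int) (p.length + k)).foldl (fun lst j =>
      let a := PySem.List.pyGetD lst j ("", 0)
      let b := PySem.List.pyGetD lst (j + 1) ("", 0)
      if PySem.Str.len b.1 < PySem.Str.len a.1 then
        (lst.set j.toNat b).set (j.toNat + 1) a
      else lst) (p ++ t) = p ++ bpassK k t := by
  induction k generalizing p t with
  | zero =>
      rw [show ((p.length : Int) + ((0:Nat):Int)) = (p.length : Int) by push_cast; ring,
        PySem.List.pyRange_one_eq_nil (le_refl _)]
      rfl
  | succ k ih =>
      match t, h with
      | a :: b :: t', h2 =>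
        have hk : k ≤ t'.length := by simp only [List.length_cons] at h2; omega
        rw [PySem.List.pyRange_one_cons (by push_cast; omega)]
        simp only [List.foldl_cons]
        have hga : PySem.List.pyGetD (p ++ a :: b :: t') (p.length : Int) ("", 0) = a := by
          rw [PySem.List.pyGetD_natCast]
          simp [List.getD]
        have hgb : PySem.List.pyGetD (p ++ a :: b :: t') ((p.length : Int) + 1) ("", 0) = b := by
          rw [show ((p.length : Int) + 1) = ((p.length + 1 : Nat) : Int) by push_cast; ring,
            PySem.List.pyGetD_natCast]
          simp [List.getD]
        have hset : ((p ++ a :: b :: t').set (p.length : Int).toNat b).set ((p.length : Int).toNat + 1) a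
            = p ++ b :: a :: t' := by
          simp only [Int.toNat_natCast, List.set_append]
          simp
        rw [hga, hgb]
        by_cases hab : PySem.Str.len b.1 < PySem.Str.len a.1
        · rw [if_pos hab, hset,
            show ((p.length : Int) + 1) = (((p ++ [b]).length : Nat) : Int) by push_cast; simp,
            show ((p.length : Int) + ((k+1 : Nat) : Int)) = (((p ++ [b]).length : Nat) : Int) + (k : Int) by push_cast; simp; ring]
          have hih := ih (p ++ [b]) (a :: t') (by simpa using hk)
          simp only [List.append_assoc, List.cons_append, List.nil_append] at hih
          have hab' : kL b < kL a := hab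
          rw [hih, show bpassK (k + 1) (a :: b :: t') = b :: bpassK k (a :: t') by
            simp only [bpassK, if_pos hab']]
        · rw [if_neg hab,
            show ((p.length : Int) + 1) = (((p ++ [a]).length : Nat) : Int) by push_cast; simp,
            show ((p.length : Int) + ((k+1 : Nat) : Int)) = (((p ++ [a]).length : Nat) : Int) + (k : Int) by push_cast; simp; ring]
          have hih := ih (p ++ [a]) (b :: t') (by simpa using hk)
          simp only [List.append_assoc, List.cons_append, List.nil_append] at hih
          have hab' : ¬ kL b < kL a := hab
          rw [hih, show bpassK (k + 1) (a :: b :: t') = a :: bpassK k (b :: t') by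
            simp only [bpassK, if_neg hab']]

theorem outer_bridge (n : Nat) (m : Nat) (hm : m ≤ n) (l : List (String × Int)) (hl : l.length = n) :
    (PySem.List.pyRange ((n - m : Nat) : Int) (n : Int)).foldl (fun lst i =>
      (PySem.List.pyRange 0 ((n : Int) - i - 1)).foldl (fun lst j =>
        let a := PySem.List.pyGetD lst j ("", 0)
        let b := PySem.List.pyGetD lst (j + 1) ("", 0)
        if PySem.Str.len b.1 < PySem.Str.len a.1 then
          (lst.set j.toNat b).set (j.toNat + 1) a
        else lst) lst) l = outerB m l := by
  induction m generalizing l with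
  | zero =>
      rw [PySem.List.pyRange_one_eq_nil (by omega)]
      rfl
  | succ m ih =>
      rw [PySem.List.pyRange_one_cons (by omega : ((n - (m+1) : Nat) : Int) < (n : Int))]
      simp only [List.foldl_cons]
      have hinner : (PySem.List.pyRange 0 ((n : Int) - ((n - (m+1) : Nat) : Int) - 1)).foldl (fun lst j =>
          let a := PySem.List.pyGetD lst j ("", 0)
          let b := PySem.List.pyGetD lst (j + 1) ("", 0)
          if PySem.Str.len b.1 < PySem.Str.len a.1 then
            (lst.set j.toNat b).set (j.toNat + 1) a
          else lst) l = bpassK m l := by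
        have := inner_bridge m [] l (by omega)
        simp only [List.length_nil, List.nil_append, Nat.cast_zero, zero_add] at this
        rw [show ((n : Int) - ((n - (m+1) : Nat) : Int) - 1) = ((m : Nat) : Int) by push_cast; omega]
        exact this
      rw [hinner,
        show (((n - (m+1) : Nat) : Int) + 1) = ((n - m : Nat) : Int) by push_cast; omega]
      rw [outerB]
      exact ih (by omega) (bpassK m l) (by rw [length_bpassK]; exact hl)

theorem alt_eq_flatMap (dizionario : List (String × Int)) :
    converti_dizionario_alt dizionario =
      (PySem.List.sorted (PySem.Set.ofList (((PySem.Dict.ofList dizionario).items).map kL)) (fun l => l)).flatMap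
        (fun c => fK c ((PySem.Dict.ofList dizionario).items)) := by
  set xs := (PySem.Dict.ofList dizionario).items with hxs
  show (PySem.List.sorted (xs.foldl (fun d p => d.modify (PySem.Str.len p.1) [] (fun l => l ++ [p])) PySem.Dict.empty).keys (fun l => l)).foldl
      (fun acc lunghezza => acc ++ (xs.foldl (fun d p => d.modify (PySem.Str.len p.1) [] (fun l => l ++ [p])) PySem.Dict.empty).getD lunghezza []) [] = _
  have hfold : xs.foldl (fun d p => d.modify (PySem.Str.len p.1) [] (fun l => l ++ [p])) PySem.Dict.empty
      = (xs.map (fun p => (kL p, p))).foldl (fun d q => d.modify q.1 [] (fun l => l ++ [q.2])) PySem.Dict.empty := by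
    rw [List.foldl_map]
    rfl
  have hgetD : ∀ c, ((xs.map (fun p => (kL p, p))).foldl (fun d q => d.modify q.1 [] (fun l => l ++ [q.2])) PySem.Dict.empty).getD c [] = fK c xs := by
    intro c
    rw [PySem.Dict.getD_foldl_modify_append]
    simp [fK, List.filter_map, Function.comp_def]
  have hkeys : ((xs.map (fun p => (kL p, p))).foldl (fun d q => d.modify q.1 [] (fun l => l ++ [q.2])) PySem.Dict.empty).keys
      = PySem.Set.ofList (xs.map kL) := by
    have := PySem.Dict.keys_foldl_modify_key (xs.map (fun p => (kL p, p))) (fun q => q.1) ([] : List (String × Int))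
      (fun d q => (fun l => l ++ [q.2])) PySem.Dict.empty
    rw [this]
    simp only [PySem.Dict.keys_empty, PySem.Set.update_nil_left]
    congr 1
    simp [Function.comp_def]
  rw [hfold, hkeys]
  rw [PySem.List.foldl_append_eq_flatMap]
  simp only [List.nil_append]
  apply List.flatMap_congr  -- maybe wrong name
  intro c hc
  exact hgetD c

theorem pairwise_le_of_const (l : List (String × Int)) (c : Int) (h : ∀ x ∈ l, kL x = c) :
    l.Pairwise (fun a b => kL a ≤ kL b) := by
  induction l with
  | nil => simp
  | cons a t ih =>
      refine List.Pairwise.cons ?_ (ih (fun x hx => h x (by simp [hx])))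
      intro y hy
      rw [h a (by simp), h y (by simp [hy])]

theorem flatMap_fK_pairwise (ks : List Int) (xs : List (String × Int)) (hks : ks.Pairwise (· < ·)) :
    (ks.flatMap (fun c => fK c xs)).Pairwise (fun a b => kL a ≤ kL b) := by
  induction ks with
  | nil => simp
  | cons c ks ih =>
      have hock := List.pairwise_cons.mp hks
      simp only [List.flatMap_cons]
      rw [List.pairwise_append]
      refine ⟨pairwise_le_of_const _ c (fun x hx => by simpa [fK] using (List.mem_filter.mp hx).2),
        ih hock.2, ?_⟩
      intro a ha b hb
      have hac : kL a = c := by simpa [fK] using (List.mem_filter.mp ha).2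
      obtain ⟨c', hc', hbc⟩ := List.mem_flatMap.mp hb
      have hbc' : kL b = c' := by simpa [fK] using (List.mem_filter.mp hbc).2
      have : c < c' := hock.1 c' hc'
      omega

theorem fK_flatMap_nil (ks : List Int) (xs : List (String × Int)) (c : Int) (hc : c ∉ ks) :
    fK c (ks.flatMap (fun c' => fK c' xs)) = [] := by
  simp only [fK]
  rw [List.filter_eq_nil_iff]
  intro x hx
  obtain ⟨c', hc', hxc⟩ := List.mem_flatMap.mp hx
  have : kL x = c' := by simpa [fK] using (List.mem_filter.mp hxc).2
  simp only [beq_iff_eq]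
  intro he
  have hcc : c = c' := by omega
  exact hc (hcc ▸ hc')

theorem fK_fK (c c' : Int) (xs : List (String × Int)) :
    fK c (fK c' xs) = if c' = c then fK c xs else [] := by
  simp only [fK, List.filter_filter]
  by_cases hcc : c' = c
  · subst hcc
    rw [if_pos rfl]
    apply List.filter_congr; intro x _; simp
  · rw [if_neg hcc, List.filter_eq_nil_iff]
    intro x _
    simp
    omega

theorem fK_flatMap (ks : List Int) (xs : List (String × Int)) (hnd : ks.Nodup) (c : Int)
    (hmem : c ∈ xs.map kL → c ∈ ks) :
    fK c (ks.flatMap (fun c' => fK c' xs)) = fK c xs := by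
  induction ks with
  | nil =>
      simp only [List.flatMap_nil]
      have : c ∉ xs.map kL := fun h => by simpa using hmem h
      simp only [fK]
      rw [List.filter_eq_nil_iff.mpr, eq_comm, List.filter_eq_nil_iff.mpr]
      · intro x hx
        simp only [beq_iff_eq]
        intro he
        exact this (List.mem_map.mpr ⟨x, hx, he⟩)
      · simp
  | cons c' ks ih =>
      have h1 : fK c (fK c' xs ++ ks.flatMap (fun c'' => fK c'' xs))
          = fK c (fK c' xs) ++ fK c (ks.flatMap (fun c'' => fK c'' xs)) := by
        simp [fK, List.filter_append]
      simp only [List.flatMap_cons, h1, fK_fK]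
      by_cases hcc : c' = c
      · subst hcc
        rw [if_pos rfl, fK_flatMap_nil ks xs c' (by simpa using (List.nodup_cons.mp hnd).1)]
        simp
      · rw [if_neg hcc, List.nil_append]
        exact ih (List.nodup_cons.mp hnd).2 (fun h => by
          rcases List.mem_cons.mp (hmem h) with rfl | hk
          · exact absurd rfl hcc
          · exact hk)

theorem alt_pairwise (dizionario : List (String × Int)) :
    (converti_dizionario_alt dizionario).Pairwise (fun a b => kL a ≤ kL b) := by
  rw [alt_eq_flatMap]
  exact flatMap_fK_pairwise _ _ (PySem.List.sorted_ofList_pairwise_lt _)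

theorem fK_alt (dizionario : List (String × Int)) (c : Int) :
    fK c (converti_dizionario_alt dizionario) = fK c ((PySem.Dict.ofList dizionario).items) := by
  rw [alt_eq_flatMap]
  apply fK_flatMap
  · exact ((PySem.List.sorted_ofList_pairwise_lt _).imp (fun h => ne_of_lt h))
  · intro h
    rw [PySem.List.mem_sorted, PySem.Set.mem_ofList]
    exact h

theorem a_eq_outerB (dizionario : List (String × Int)) :
    converti_dizionario dizionario = outerB ((PySem.Dict.ofList dizionario).items).length ((PySem.Dict.ofList dizionario).items) := by
  set xs := (PySem.Dict.ofList dizionario).items with hxs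
  show (PySem.List.pyRange 0 (xs.length : Int)).foldl _ xs = _
  have := outer_bridge xs.length xs.length (le_refl _) xs rfl
  rw [show ((xs.length - xs.length : Nat) : Int) = 0 by simp] at this
  exact this

-- ===== VERDICT (by name: the statement is the Claim_ definition above) =====
theorem converti_dizionario_spec : Claim_equal_converti_dizionario := by
  intro dizionario _
  unfold Spec_converti_dizionario
  rw [a_eq_outerB]
  apply stable_unique
  · have := outerB_pairwise ((PySem.Dict.ofList dizionario).items).length ((PySem.Dict.ofList dizionario).items) [] rfl
      (by simp) (by simp)
    simpa using this
  · exact alt_pairwise dizionario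
  · intro c
    rw [fK_outerB, fK_alt]
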